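-- pv_equiv track=rewrite | github.com/NorAlnaami/dataMining | ID2222/HW2Correct/correctApriori.py | check_triple
-- ===== SOURCE A (Python) =====
-- import itertools as it
--
-- def check_triple(item_set, pairs_flat, k):
--     count = 0
--     pairs = set(it.combinations(pairs_flat, k-1))
--
--     pairs_triple = set(it.combinations(item_set, k-1))
--     for item in pairs_triple:
--         if item in pairs:
--             count +=1
--     if count ==k:
--         return True
--     else:
--         return False
-- ===== SOURCE B (Python) =====
-- import itertools as it
--
-- def _is_subseq(cand, xs):
--     # greedy subsequence test: cand occurs in xs in order
--     i = 0
--     n = len(xs)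
--     for c in cand:
--         while i < n and xs[i] != c:
--             i += 1
--         if i == n:
--             return False
--         i += 1
--     return True
--
-- def check_triple(item_set, pairs_flat, k):
--     # A tuple is a (k-1)-combination of pairs_flat iff it is a subsequence of
--     # pairs_flat of length k-1, so test each candidate directly rather than
--     # materialising the set of all combinations of pairs_flat; once the count
--     # exceeds k the answer can only be False, so stop early.
--     count = 0
--     for cand in set(it.combinations(item_set, k - 1)):
--         if _is_subseq(cand, pairs_flat):
--             count += 1
--             if count > k:
--                 return False
--     return count == k
-- ===== Notes on version B (the rewrite author's own statement) =====
-- stated objective: alternative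
-- what changed: B never builds the set of all (k-1)-combinations of pairs_flat: it tests each candidate (k-1)-combination of item_set directly with a greedy subsequence scan of pairs_flat, and exits early once the count exceeds k.
import Mathlib
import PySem

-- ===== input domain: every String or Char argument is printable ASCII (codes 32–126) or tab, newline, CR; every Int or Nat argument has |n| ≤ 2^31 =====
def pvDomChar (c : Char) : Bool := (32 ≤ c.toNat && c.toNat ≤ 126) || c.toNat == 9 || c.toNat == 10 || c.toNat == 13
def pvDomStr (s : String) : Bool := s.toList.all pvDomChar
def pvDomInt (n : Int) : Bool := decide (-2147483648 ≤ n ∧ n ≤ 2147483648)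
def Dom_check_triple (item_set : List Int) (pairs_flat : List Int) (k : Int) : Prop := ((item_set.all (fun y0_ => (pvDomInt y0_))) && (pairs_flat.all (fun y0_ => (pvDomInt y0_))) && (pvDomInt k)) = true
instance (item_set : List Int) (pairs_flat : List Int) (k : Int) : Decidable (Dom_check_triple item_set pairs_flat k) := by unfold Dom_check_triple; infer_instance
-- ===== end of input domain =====

-- B never builds the set of all (k-1)-combinations of pairs_flat: it tests each
-- candidate combination of item_set by a greedy subsequence scan, exiting early
-- once the count exceeds k (objective: alternative).

-- ===== PORT A =====
-- itertools.combinations(xs, r) as tuples-of-lists, in itertools' order (shared by both ports)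
def pvCombos : List Int → Nat → List (List Int)
  | _, 0 => [[]]
  | [], _ + 1 => []
  | x :: xs, r + 1 => (pvCombos xs r).map (fun t => x :: t) ++ pvCombos xs (r + 1)

def check_triple (item_set : List Int) (pairs_flat : List Int) (k : Int) : Bool :=
  let pairs : PySem.Set (List Int) := PySem.Set.ofList (pvCombos pairs_flat (k - 1).toNat)
  let pairs_triple : PySem.Set (List Int) := PySem.Set.ofList (pvCombos item_set (k - 1).toNat)
  let count : Int := pairs_triple.foldl (fun c item => if pairs.contains item then c + 1 else c) 0
  if count == k then true else false

-- ===== PORT B =====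
-- greedy subsequence test (_is_subseq in Source B)
def pvIsSubseq : List Int → List Int → Bool
  | [], _ => true
  | _ :: _, [] => false
  | c :: cs, x :: xs => if x == c then pvIsSubseq cs xs else pvIsSubseq (c :: cs) xs

-- the candidate loop of Source B, with its early 'count > k → False' exit
def pvLoop (pairs_flat : List Int) (k : Int) : List (List Int) → Int → Bool
  | [], count => count == k
  | cand :: rest, count =>
      if pvIsSubseq cand pairs_flat then
        if count + 1 > k then false else pvLoop pairs_flat k rest (count + 1)
      else pvLoop pairs_flat k rest count

def check_triple_alt (item_set : List Int) (pairs_flat : List Int) (k : Int) : Bool :=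
  pvLoop pairs_flat k (PySem.Set.ofList (pvCombos item_set (k - 1).toNat)) 0

-- ===== PRECONDITION & SPEC =====
-- Python raises ValueError ("r must be non-negative") for k ≤ 0; both A and B raise there.
def Pre_check_triple (item_set : List Int) (pairs_flat : List Int) (k : Int) : Prop := 1 ≤ k
instance (item_set : List Int) (pairs_flat : List Int) (k : Int) : Decidable (Pre_check_triple item_set pairs_flat k) := by unfold Pre_check_triple; infer_instance
def pvWitness_check_triple : List Int × List Int × Int := ([1, 2, 3], [1, 2, 3], 3)

def Spec_check_triple (item_set : List Int) (pairs_flat : List Int) (k : Int) (out : Bool) : Prop := out = check_triple_alt item_set pairs_flat k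
instance (item_set : List Int) (pairs_flat : List Int) (k : Int) (out : Bool) : Decidable (Spec_check_triple item_set pairs_flat k out) := by unfold Spec_check_triple; infer_instance

-- ===== CLAIM (what is proved, stated in full; the proofs are below) =====
def Claim_equal_check_triple : Prop := ∀ (item_set : List Int) (pairs_flat : List Int) (k : Int), Dom_check_triple item_set pairs_flat k → Pre_check_triple item_set pairs_flat k → Spec_check_triple item_set pairs_flat k (check_triple item_set pairs_flat k)

-- ===== LEMMAS AND PROOFS =====

theorem mem_pvCombos : ∀ (xs : List Int) (r : Nat) (l : List Int),
    l ∈ pvCombos xs r ↔ l.length = r ∧ l.Sublist xs := by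
  intro xs
  induction xs with
  | nil =>
    intro r l
    cases r with
    | zero => simp [pvCombos, List.length_eq_zero_iff]
    | succ r =>
      simp [pvCombos]
      rintro h rfl
      simp at h
  | cons x xs ih =>
    intro r l
    cases r with
    | zero =>
      simp [pvCombos, List.length_eq_zero_iff]
      rintro rfl; exact List.nil_sublist _
    | succ r =>
      simp only [pvCombos, List.mem_append, List.mem_map, ih]
      constructor
      · rintro (⟨t, ⟨hlen, hsub⟩, rfl⟩ | ⟨hlen, hsub⟩)
        · exact ⟨by simp [hlen], List.cons_sublist_cons.mpr hsub⟩
        · exact ⟨hlen, hsub.trans (List.sublist_cons_self x xs)⟩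
      · rintro ⟨hlen, hsub⟩
        rcases List.sublist_cons_iff.mp hsub with h | ⟨t, rfl, ht⟩
        · exact Or.inr ⟨hlen, h⟩
        · exact Or.inl ⟨t, ⟨by simpa using hlen, ht⟩, rfl⟩

theorem pvIsSubseq_iff : ∀ (xs l : List Int), pvIsSubseq l xs = true ↔ l.Sublist xs := by
  intro xs
  induction xs with
  | nil =>
    intro l; cases l <;> simp [pvIsSubseq]
  | cons x xs ih =>
    intro l
    cases l with
    | nil => simp [pvIsSubseq]
    | cons c cs =>
      by_cases h : x = c
      · subst h
        simp [pvIsSubseq, ih, List.cons_sublist_cons]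
      · simp only [pvIsSubseq, beq_iff_eq, if_neg h, ih]
        constructor
        · intro hs; exact hs.trans (List.sublist_cons_self x xs)
        · intro hs
          rcases List.sublist_cons_iff.mp hs with h' | ⟨t, he, _⟩
          · exact h'
          · exact absurd (List.cons.injEq .. ▸ he).1.symm h

theorem foldl_count_ge (pf : List Int) : ∀ (cands : List (List Int)) (c : Int),
    c ≤ List.foldl (fun c cand => if pvIsSubseq cand pf then c + 1 else c) c cands := by
  intro cands
  induction cands with
  | nil => intro c; simp
  | cons cand rest ih =>
    intro c
    simp only [List.foldl_cons]
    split
    · exact le_trans (by omega) (ih (c + 1))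
    · exact ih c

theorem pvLoop_eq_foldl (pf : List Int) (k : Int) : ∀ (cands : List (List Int)) (c : Int),
    c ≤ k →
    pvLoop pf k cands c
      = (List.foldl (fun c cand => if pvIsSubseq cand pf then c + 1 else c) c cands == k) := by
  intro cands
  induction cands with
  | nil => intro c _; rfl
  | cons cand rest ih =>
    intro c hc
    simp only [pvLoop, List.foldl_cons]
    by_cases hs : pvIsSubseq cand pf = true
    · simp only [hs, if_true]
      by_cases hk : c + 1 > k
      · have hcount := foldl_count_ge pf rest (c + 1)
        have : ¬ (List.foldl (fun c cand => if pvIsSubseq cand pf then c + 1 else c)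
            (c + 1) rest = k) := by omega
        simp [hk, this]
      · simp only [if_neg hk]
        exact ih (c + 1) (by omega)
    · simp only [Bool.not_eq_true] at hs
      simp only [hs, Bool.false_eq_true, if_false]
      exact ih c hc

-- ===== VERDICT (by name: the statement is the Claim_ definition above) =====
theorem check_triple_spec : Claim_equal_check_triple := by
  intro item_set pairs_flat k _ hk
  show check_triple item_set pairs_flat k = check_triple_alt item_set pairs_flat k
  simp only [check_triple, check_triple_alt]
  have h : List.foldl
      (fun c item =>
        if (PySem.Set.ofList (pvCombos pairs_flat (k - 1).toNat)).contains item then c + 1 else c)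
      (0 : Int) (PySem.Set.ofList (pvCombos item_set (k - 1).toNat))
      = List.foldl (fun c cand => if pvIsSubseq cand pairs_flat then c + 1 else c)
      (0 : Int) (PySem.Set.ofList (pvCombos item_set (k - 1).toNat)) := by
    apply PySem.List.foldl_congr_mem
    intro acc cand hmem
    have hc : cand ∈ pvCombos item_set (k - 1).toNat := (PySem.Set.mem_ofList _ _).mp hmem
    have hlen : cand.length = (k - 1).toNat := ((mem_pvCombos _ _ _).mp hc).1
    have hcontains : (PySem.Set.ofList (pvCombos pairs_flat (k - 1).toNat)).contains cand
        = pvIsSubseq cand pairs_flat := by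
      rw [Bool.eq_iff_iff, PySem.Set.contains_iff, PySem.Set.mem_ofList, mem_pvCombos,
        pvIsSubseq_iff]
      tauto
    rw [hcontains]
  rw [h, pvLoop_eq_foldl pairs_flat k _ 0 (by exact le_trans (by norm_num) hk)]
  cases hb : (List.foldl (fun c cand => if pvIsSubseq cand pairs_flat then c + 1 else c)
      (0 : Int) (PySem.Set.ofList (pvCombos item_set (k - 1).toNat)) == k) <;> simp
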